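-- pv_equiv track=rewrite | github.com/harshwaladvisory/Bank_Transaction_Posting_Tool | processors/module_router.py | _determine_disbursement_type
-- ===== SOURCE A (Python) =====
-- from typing import Dict, List, Tuple
--
-- def _determine_disbursement_type(transaction: Dict) -> str:
--     """Determine the type of cash disbursement"""
--     description = transaction.get('description', '').lower()
--
--     if any(kw in description for kw in ['payroll', 'salary', 'adp', 'paychex', 'gusto']):
--         return 'Payroll'
--     elif any(kw in description for kw in ['irs', 'eftps', 'tax']):
--         return 'Tax Payment'
--     elif any(kw in description for kw in ['rent', 'lease', 'mortgage']):
--         return 'Rent/Lease'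
--     elif any(kw in description for kw in ['utility', 'electric', 'gas', 'water', 'phone']):
--         return 'Utilities'
--     elif any(kw in description for kw in ['insurance', 'premium']):
--         return 'Insurance'
--     else:
--         return 'Vendor Payment'
-- ===== SOURCE B (Python) =====
-- LABELS = ('Payroll', 'Tax Payment', 'Rent/Lease', 'Utilities', 'Insurance', 'Vendor Payment')
--
-- KEYWORD_RANK = {
--     'payroll': 0, 'salary': 0, 'adp': 0, 'paychex': 0, 'gusto': 0,
--     'irs': 1, 'eftps': 1, 'tax': 1,
--     'rent': 2, 'lease': 2, 'mortgage': 2,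
--     'utility': 3, 'electric': 3, 'gas': 3, 'water': 3, 'phone': 3,
--     'insurance': 4, 'premium': 4,
-- }
--
-- def _determine_disbursement_type(transaction):
--     description = transaction.get('description', '').lower()
--     best = len(LABELS) - 1
--     for kw, rank in KEYWORD_RANK.items():
--         if kw in description:
--             best = min(best, rank)
--     return LABELS[best]
-- ===== Notes on version B (the rewrite author's own statement) =====
-- stated objective: alternative
-- what changed: Replaced the first-match if/elif cascade over keyword groups with a flat keyword-to-priority map folded with min over all matching keywords, then a final index into a label table; priority is decided arithmetically, not by control flow.
import Mathlib
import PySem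

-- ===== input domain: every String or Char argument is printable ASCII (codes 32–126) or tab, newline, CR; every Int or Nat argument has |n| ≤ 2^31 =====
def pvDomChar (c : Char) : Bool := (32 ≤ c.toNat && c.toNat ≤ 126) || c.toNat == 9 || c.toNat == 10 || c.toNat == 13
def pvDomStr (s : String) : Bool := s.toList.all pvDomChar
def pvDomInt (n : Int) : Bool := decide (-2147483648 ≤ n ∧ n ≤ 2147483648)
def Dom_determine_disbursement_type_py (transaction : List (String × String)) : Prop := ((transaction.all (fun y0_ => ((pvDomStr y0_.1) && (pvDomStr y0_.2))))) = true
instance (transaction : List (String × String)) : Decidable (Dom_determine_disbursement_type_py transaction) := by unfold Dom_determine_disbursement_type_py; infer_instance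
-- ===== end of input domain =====

-- B replaces A's first-match if/elif cascade with a flat keyword→priority map folded with min, then an index into a label table (alternative; same cost).

-- ===== PORT A =====
def determine_disbursement_type_py (transaction : List (String × String)) : String :=
  let description := PySem.Str.lower (PySem.Dict.getD (PySem.Dict.ofList transaction) "description" "")
  if ["payroll", "salary", "adp", "paychex", "gusto"].any (fun kw => PySem.Str.isIn kw description) then
    "Payroll"
  else if ["irs", "eftps", "tax"].any (fun kw => PySem.Str.isIn kw description) then
    "Tax Payment"
  else if ["rent", "lease", "mortgage"].any (fun kw => PySem.Str.isIn kw description) then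
    "Rent/Lease"
  else if ["utility", "electric", "gas", "water", "phone"].any (fun kw => PySem.Str.isIn kw description) then
    "Utilities"
  else if ["insurance", "premium"].any (fun kw => PySem.Str.isIn kw description) then
    "Insurance"
  else
    "Vendor Payment"

-- ===== PORT B =====
def pvLabels : List String :=
  ["Payroll", "Tax Payment", "Rent/Lease", "Utilities", "Insurance", "Vendor Payment"]

def pvKeywordRank : List (String × Int) :=
  [("payroll", 0), ("salary", 0), ("adp", 0), ("paychex", 0), ("gusto", 0),
   ("irs", 1), ("eftps", 1), ("tax", 1),
   ("rent", 2), ("lease", 2), ("mortgage", 2),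
   ("utility", 3), ("electric", 3), ("gas", 3), ("water", 3), ("phone", 3),
   ("insurance", 4), ("premium", 4)]

def determine_disbursement_type_py_alt (transaction : List (String × String)) : String :=
  let description := PySem.Str.lower (PySem.Dict.getD (PySem.Dict.ofList transaction) "description" "")
  -- best = len(LABELS) - 1; for kw, rank in KEYWORD_RANK.items(): if kw in description: best = min(best, rank)
  let best := pvKeywordRank.foldl
    (fun best p => if PySem.Str.isIn p.1 description then min best p.2 else best)
    ((pvLabels.length : Int) - 1)
  -- LABELS[best]; best is always in range, default unreachable
  (PySem.List.pyGet? pvLabels best).getD ""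

-- ===== PRECONDITION & SPEC =====
def Spec_determine_disbursement_type_py (transaction : List (String × String)) (out : String) : Prop := out = determine_disbursement_type_py_alt transaction
instance (transaction : List (String × String)) (out : String) : Decidable (Spec_determine_disbursement_type_py transaction out) := by unfold Spec_determine_disbursement_type_py; infer_instance

-- ===== CLAIM =====
def Claim_equal_determine_disbursement_type_py : Prop := ∀ (transaction : List (String × String)), Dom_determine_disbursement_type_py transaction → Spec_determine_disbursement_type_py transaction (determine_disbursement_type_py transaction)

-- ===== LEMMAS AND PROOFS =====

-- folding min over one keyword group (all the same rank) is 'min acc r' iff some keyword matches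
theorem pv_group_fold (d : String) (kws : List String) (r acc : Int) :
    (kws.map (fun k => (k, r))).foldl
        (fun best p => if PySem.Str.isIn p.1 d then min best p.2 else best) acc
      = if kws.any (fun k => PySem.Str.isIn k d) then min acc r else acc := by
  induction kws generalizing acc with
  | nil => simp
  | cons k t ih =>
    simp only [List.map_cons, List.foldl_cons, List.any_cons]
    by_cases h : PySem.Str.isIn k d = true
    · rw [if_pos h, ih]
      have hc : (PySem.Str.isIn k d || t.any fun k => PySem.Str.isIn k d) = true := by
        rw [h]; rfl
      rw [if_pos hc]
      by_cases h2 : (t.any fun k => PySem.Str.isIn k d) = true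
      · rw [if_pos h2]
        rw [min_assoc, min_self]
      · rw [if_neg h2]
    · have h' : PySem.Str.isIn k d = false := by rwa [Bool.not_eq_true] at h
      rw [if_neg h, ih]
      by_cases h2 : (t.any fun k => PySem.Str.isIn k d) = true
      · have hc : (PySem.Str.isIn k d || t.any fun k => PySem.Str.isIn k d) = true := by
          rw [h', h2]; rfl
        rw [if_pos h2, if_pos hc]
      · have hc : ¬((PySem.Str.isIn k d || t.any fun k => PySem.Str.isIn k d) = true) := by
          rw [h']; simpa using h2
        rw [if_neg h2, if_neg hc]

theorem pv_rank_split : pvKeywordRank =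
    (["payroll", "salary", "adp", "paychex", "gusto"].map (fun k => (k, (0 : Int))))
    ++ (["irs", "eftps", "tax"].map (fun k => (k, (1 : Int))))
    ++ (["rent", "lease", "mortgage"].map (fun k => (k, (2 : Int))))
    ++ (["utility", "electric", "gas", "water", "phone"].map (fun k => (k, (3 : Int))))
    ++ (["insurance", "premium"].map (fun k => (k, (4 : Int)))) := by
  rfl

-- ===== VERDICT =====
theorem determine_disbursement_type_py_spec : Claim_equal_determine_disbursement_type_py := by
  intro transaction _
  unfold Spec_determine_disbursement_type_py determine_disbursement_type_py determine_disbursement_type_py_alt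
  set d := PySem.Str.lower (PySem.Dict.getD (PySem.Dict.ofList transaction) "description" "") with hd
  rw [pv_rank_split]
  simp only [List.foldl_append, pv_group_fold]
  cases h1 : ["payroll", "salary", "adp", "paychex", "gusto"].any (fun k => PySem.Str.isIn k d) <;>
  cases h2 : ["irs", "eftps", "tax"].any (fun k => PySem.Str.isIn k d) <;>
  cases h3 : ["rent", "lease", "mortgage"].any (fun k => PySem.Str.isIn k d) <;>
  cases h4 : ["utility", "electric", "gas", "water", "phone"].any (fun k => PySem.Str.isIn k d) <;>
  cases h5 : ["insurance", "premium"].any (fun k => PySem.Str.isIn k d) <;>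
  rfl
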